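-- pv_equiv track=rewrite | github.com/Mariam56Elgazzar/Data2Dash_KnoweledgeGraph | insightgraph_pipeline.py | prioritize_chunks
-- ===== SOURCE A (Python) =====
-- from typing import List, Tuple, Optional, Iterable, Dict
--
-- def prioritize_chunks(chunks: List[str]) -> List[str]:
--     priority_keywords = [
--         "method", "architecture", "model", "transformer", "attention",
--         "experiment", "results", "evaluation", "dataset", "benchmark",
--         "training", "loss", "approach", "encoder", "decoder",
--         "et al", "proposed", "compared", "achieves", "outperforms",
--         "baseline", "metric", "accuracy", "f1", "bleu",
--         "ablation", "limitation", "hyperparameter", "contribution"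
--     ]
--     scored = [(sum(k in c.lower() for k in priority_keywords), c) for c in chunks]
--     scored.sort(reverse=True, key=lambda x: x[0])
--     return [c for _, c in scored]
-- ===== SOURCE B (Python) =====
-- from typing import List
--
-- def prioritize_chunks(chunks: List[str]) -> List[str]:
--     priority_keywords = [
--         "method", "architecture", "model", "transformer", "attention",
--         "experiment", "results", "evaluation", "dataset", "benchmark",
--         "training", "loss", "approach", "encoder", "decoder",
--         "et al", "proposed", "compared", "achieves", "outperforms",
--         "baseline", "metric", "accuracy", "f1", "bleu",
--         "ablation", "limitation", "hyperparameter", "contribution"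
--     ]
--     scored = []
--     for c in chunks:
--         t = c.lower()
--         scored.append((sum(k in t for k in priority_keywords), c))
--     # counting-sort style: emit chunks score by score, high to low,
--     # original order preserved within each score
--     out = []
--     for s in range(len(priority_keywords), -1, -1):
--         out.extend(c for sc, c in scored if sc == s)
--     return out
-- ===== Notes on version B (the rewrite author's own statement) =====
-- stated objective: alternative
-- what changed: Replaces the stable reverse sort by a counting/bucket pass: chunks are scored once, then emitted score by score from the maximum possible score down to 0, which reproduces the stable descending order without sorting.
import Mathlib
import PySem

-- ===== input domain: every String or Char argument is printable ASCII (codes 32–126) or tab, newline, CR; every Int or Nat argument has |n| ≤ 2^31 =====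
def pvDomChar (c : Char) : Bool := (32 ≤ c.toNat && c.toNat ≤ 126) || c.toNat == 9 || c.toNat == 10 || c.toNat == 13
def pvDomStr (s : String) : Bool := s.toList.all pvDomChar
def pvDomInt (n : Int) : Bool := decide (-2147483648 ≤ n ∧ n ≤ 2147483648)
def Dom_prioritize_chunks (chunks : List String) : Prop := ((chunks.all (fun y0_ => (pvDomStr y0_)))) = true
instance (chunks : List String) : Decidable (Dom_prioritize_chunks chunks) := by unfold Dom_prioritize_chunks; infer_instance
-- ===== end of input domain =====

-- B replaces the stable reverse sort by a counting/bucket pass over scores 29..0 (alternative algorithm, same cost class).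


-- the keyword list both Pythons define locally
def pvKeywords : List String :=
  ["method", "architecture", "model", "transformer", "attention",
   "experiment", "results", "evaluation", "dataset", "benchmark",
   "training", "loss", "approach", "encoder", "decoder",
   "et al", "proposed", "compared", "achieves", "outperforms",
   "baseline", "metric", "accuracy", "f1", "bleu",
   "ablation", "limitation", "hyperparameter", "contribution"]

-- ===== PORT A =====
def prioritize_chunks (chunks : List String) : List String :=
  let priority_keywords := pvKeywords
  let scored := chunks.map (fun c =>
    ((priority_keywords.map (fun k => if PySem.Str.isIn k (PySem.Str.lower c) then (1 : Int) else 0)).sum, c))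
  let sortedScored := PySem.List.sorted scored (fun x => x.1) true
  sortedScored.map (fun p => p.2)

-- ===== PORT B =====
def prioritize_chunks_alt (chunks : List String) : List String :=
  let priority_keywords := pvKeywords
  let scored := chunks.foldl (fun acc c =>
    let t := PySem.Str.lower c
    acc ++ [((priority_keywords.map (fun k => if PySem.Str.isIn k t then (1 : Int) else 0)).sum, c)]) []
  (PySem.List.pyRange (PySem.List.len priority_keywords) (-1) (-1)).foldl
    (fun out s => out ++ (scored.filter (fun p => p.1 == s)).map (fun p => p.2)) []

-- ===== PRECONDITION & SPEC =====
def Spec_prioritize_chunks (chunks : List String) (out : List String) : Prop := out = prioritize_chunks_alt chunks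
instance (chunks : List String) (out : List String) : Decidable (Spec_prioritize_chunks chunks out) := by unfold Spec_prioritize_chunks; infer_instance

-- ===== CLAIM (what is proved, stated in full; the proofs are below) =====
def Claim_equal_prioritize_chunks : Prop := ∀ (chunks : List String), Dom_prioritize_chunks chunks → Spec_prioritize_chunks chunks (prioritize_chunks chunks)

-- ===== LEMMAS AND PROOFS =====

-- buckets of pairs with key n, n-1, …, 0, each bucket in original order
def descBuckets {α : Type} : Nat → List (Int × α) → List (Int × α)
  | 0, xs => xs.filter (fun p => p.1 == (0 : Int))
  | n + 1, xs => xs.filter (fun p => p.1 == ((n + 1 : Nat) : Int)) ++ descBuckets n xs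

theorem descBuckets_nil {α : Type} (n : Nat) : descBuckets (α := α) n [] = [] := by
  induction n with
  | zero => rfl
  | succ n ih => simp [descBuckets, ih]

theorem mem_descBuckets {α : Type} {n : Nat} {xs : List (Int × α)} {p : Int × α}
    (h : p ∈ descBuckets n xs) : 0 ≤ p.1 ∧ p.1 ≤ (n : Int) := by
  induction n with
  | zero =>
    simp only [descBuckets, List.mem_filter, beq_iff_eq] at h
    omega
  | succ n ih =>
    simp only [descBuckets, List.mem_append, List.mem_filter, beq_iff_eq] at h
    rcases h with ⟨_, h⟩ | h
    · push_cast at h; omega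
    · have := ih h; push_cast at this; omega

theorem descBuckets_append_of_gt {α : Type} {n : Nat} {x : Int × α} (xs : List (Int × α))
    (hx : (n : Int) < x.1) : descBuckets n (xs ++ [x]) = descBuckets n xs := by
  induction n with
  | zero =>
    simp only [descBuckets, List.filter_append]
    have : (x.1 == (0 : Int)) = false := by simp; omega
    simp [List.filter, this]
  | succ n ih =>
    have ih' := ih (by push_cast at hx ⊢; omega)
    simp only [descBuckets, List.filter_append, ih']
    have hne : (x.1 == ((n : Int) + 1)) = false := by simp; push_cast at hx; omega
    simp [List.filter, hne]

theorem insertBy_append_of_not_before {α : Type} (before : α → α → Bool) (x : α)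
    (p t : List α) (hp : ∀ y ∈ p, before x y = false) :
    PySem.List.insertBy before x (p ++ t) = p ++ PySem.List.insertBy before x t := by
  induction p with
  | nil => simp
  | cons y p ih =>
    have hy : before x y = false := hp y (by simp)
    have : PySem.List.insertBy before x (y :: (p ++ t)) =
        if before x y then x :: y :: (p ++ t) else y :: PySem.List.insertBy before x (p ++ t) := rfl
    simp [this, hy, ih (fun z hz => hp z (by simp [hz]))]

theorem insertBy_all_before {α : Type} (before : α → α → Bool) (x : α)
    (t : List α) (ht : ∀ y ∈ t, before x y = true) :
    PySem.List.insertBy before x t = x :: t := by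
  cases t with
  | nil => rfl
  | cons y t =>
    have hy : before x y = true := ht y (by simp)
    have : PySem.List.insertBy before x (y :: t) =
        if before x y then x :: y :: t else y :: PySem.List.insertBy before x t := rfl
    simp [this, hy]

theorem insertBy_descBuckets {α : Type} (n : Nat) (x : Int × α) (l : List (Int × α))
    (h0 : 0 ≤ x.1) (hn : x.1 ≤ (n : Int)) :
    PySem.List.insertBy (fun a b => decide (b.1 < a.1)) x (descBuckets n l) =
      descBuckets n (l ++ [x]) := by
  induction n generalizing l with
  | zero =>
    have hx : x.1 = 0 := by omega
    have hall : ∀ y ∈ descBuckets (α := α) 0 l, (decide (y.1 < x.1)) = false := by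
      intro y hy
      have := mem_descBuckets hy
      simp; omega
    rw [PySem.List.insertBy_of_forall_not_before _ _ _ hall]
    simp [descBuckets, List.filter_append, List.filter, hx]
  | succ n ih =>
    by_cases hcase : x.1 ≤ (n : Int)
    · -- x goes into a strictly lower bucket: skip bucket n+1, recurse
      have hskip : ∀ y ∈ l.filter (fun p => p.1 == ((n + 1 : Nat) : Int)),
          (decide (y.1 < x.1)) = false := by
        intro y hy
        simp only [List.mem_filter, beq_iff_eq] at hy
        simp [hy.2]; omega
      simp only [descBuckets]
      rw [insertBy_append_of_not_before _ _ _ _ hskip, ih l hcase]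
      have hne : (x.1 == ((n : Int) + 1)) = false := by simp; omega
      simp [List.filter_append, List.filter, hne]
    · -- x belongs to the topmost bucket n+1
      have hx : x.1 = ((n + 1 : Nat) : Int) := by push_cast at hn; push_cast; omega
      have hskip : ∀ y ∈ l.filter (fun p => p.1 == ((n + 1 : Nat) : Int)),
          (decide (y.1 < x.1)) = false := by
        intro y hy
        simp only [List.mem_filter, beq_iff_eq] at hy
        simp [hy.2, hx]
      simp only [descBuckets]
      rw [insertBy_append_of_not_before _ _ _ _ hskip]
      rw [insertBy_all_before _ _ _ (by
        intro y hy
        have := mem_descBuckets hy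
        simp [hx]; omega)]
      rw [descBuckets_append_of_gt l (by rw [hx]; push_cast; omega)]
      simp [List.filter_append, List.filter, hx]

theorem sorted_rev_eq_descBuckets {α : Type} (n : Nat) (xs : List (Int × α))
    (hb : ∀ p ∈ xs, 0 ≤ p.1 ∧ p.1 ≤ (n : Int)) :
    PySem.List.sorted xs (fun p => p.1) true = descBuckets n xs := by
  rw [PySem.List.sorted_rev_eq_foldl_insertBy]
  induction xs using List.reverseRecOn with
  | nil => simpa using (descBuckets_nil n).symm
  | append_singleton l x ih =>
    rw [List.foldl_append]
    simp only [List.foldl_cons, List.foldl_nil]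
    rw [ih (fun p hp => hb p (by simp [hp]))]
    have hx := hb x (by simp)
    exact insertBy_descBuckets n x l hx.1 hx.2

theorem descBuckets_eq_flatMap {α : Type} (n : Nat) (xs : List (Int × α)) :
    descBuckets n xs =
      ((List.range (n + 1)).map (fun k : Nat => ((n : Int) - (k : Int)))).flatMap
        (fun s => xs.filter (fun p => p.1 == s)) := by
  induction n with
  | zero => simp [descBuckets]
  | succ n ih =>
    rw [descBuckets, ih]
    have h1 : ((fun k : Nat => (((n + 1 : Nat) : Int) - (k : Int))) ∘ Nat.succ) =
        (fun k : Nat => ((n : Int) - (k : Int))) := by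
      funext k
      simp only [Function.comp_apply]
      push_cast
      ring
    conv_rhs => rw [List.range_succ_eq_map]
    simp only [List.map_cons, List.map_map, List.flatMap_cons, h1, Nat.cast_zero, sub_zero]

-- the score both ports compute for a chunk (definitionally the inline term in each port)
def pvScore (c : String) : Int :=
  (pvKeywords.map (fun k => if PySem.Str.isIn k (PySem.Str.lower c) then (1 : Int) else 0)).sum

theorem pvScore_bounds (c : String) : 0 ≤ pvScore c ∧ pvScore c ≤ (29 : Int) := by
  have h : pvScore c = ((pvKeywords.countP (fun k => PySem.Str.isIn k (PySem.Str.lower c)) : Nat) : Int) :=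
    PySem.List.sum_map_ite_one_zero _ _
  have hle : pvKeywords.countP (fun k => PySem.Str.isIn k (PySem.Str.lower c)) ≤ 29 := by
    have := List.countP_le_length (p := fun k => PySem.Str.isIn k (PySem.Str.lower c)) (l := pvKeywords)
    simpa [pvKeywords] using this
  constructor
  · rw [h]; positivity
  · rw [h]; exact_mod_cast hle

-- ===== VERDICT (by name: the statement is the Claim_ definition above) =====
set_option maxHeartbeats 1000000 in
theorem prioritize_chunks_spec : Claim_equal_prioritize_chunks := by
  intro chunks _
  unfold Spec_prioritize_chunks
  show (PySem.List.sorted (chunks.map (fun c => (pvScore c, c))) (fun x => x.1) true).map (fun p => p.2) =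
    (PySem.List.pyRange (PySem.List.len pvKeywords) (-1) (-1)).foldl
      (fun out s => out ++
        ((chunks.foldl (fun acc c => acc ++ [(pvScore c, c)]) []).filter (fun p => p.1 == s)).map
          (fun p => p.2)) []
  have hscored : chunks.foldl (fun acc c => acc ++ [(pvScore c, c)]) [] =
      chunks.map (fun c => (pvScore c, c)) :=
    (PySem.List.foldl_append_singleton_eq_map (fun c => (pvScore c, c)) chunks []).trans
      (List.nil_append _)
  have hlen : PySem.List.len pvKeywords = (29 : Int) := by decide
  have hrange : PySem.List.pyRange (29 : Int) (-1) (-1) =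
      (List.range 30).map (fun k : Nat => ((29 : Int) - (k : Int))) := by decide
  have hbound : ∀ p ∈ chunks.map (fun c => (pvScore c, c)), 0 ≤ p.1 ∧ p.1 ≤ ((29 : Nat) : Int) := by
    intro p hp
    obtain ⟨c, _, rfl⟩ := List.mem_map.mp hp
    simpa using pvScore_bounds c
  rw [hscored, hlen, hrange,
    sorted_rev_eq_descBuckets 29 _ hbound, descBuckets_eq_flatMap 29 _,
    PySem.List.foldl_append_eq_flatMap]
  simp [List.map_flatMap]
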